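-- pv_equiv track=rewrite | github.com/rtoy/maxima-dep-analysis | macro-deps.py | strip_strings_and_comments
-- ===== SOURCE A (Python) =====
-- def strip_strings_and_comments(src):
--     """Strip Lisp ;-comments and "..." string contents to avoid false
--     positives. Keeps file structure intact (newlines preserved)."""
--     out = []
--     i, n = 0, len(src)
--     while i < n:
--         c = src[i]
--         # Block comment #| ... |#
--         if c == '#' and i + 1 < n and src[i+1] == '|':
--             depth = 1
--             i += 2
--             while i < n and depth > 0:
--                 if src[i] == '#' and i + 1 < n and src[i+1] == '|':
--                     depth += 1; i += 2
--                 elif src[i] == '|' and i + 1 < n and src[i+1] == '#':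
--                     depth -= 1; i += 2
--                 else:
--                     if src[i] == '\n':
--                         out.append('\n')
--                     i += 1
--             continue
--         # Line comment ;... to EOL
--         if c == ';':
--             while i < n and src[i] != '\n':
--                 i += 1
--             continue
--         # String literal "..."
--         if c == '"':
--             out.append('"')
--             i += 1
--             while i < n:
--                 if src[i] == '\\' and i + 1 < n:
--                     i += 2
--                     continue
--                 if src[i] == '"':
--                     out.append('"')
--                     i += 1
--                     break
--                 if src[i] == '\n':
--                     out.append('\n')
--                 i += 1
--             continue
--         out.append(c)
--         i += 1
--     return ''.join(out)
-- ===== SOURCE B (Python) =====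
-- def strip_strings_and_comments(src):
--     """One-pass character state machine (no index, no lookahead): states
--     NORMAL/HASH/LINE/STR/STR_ESC/BLOCK/BLOCK_HASH/BLOCK_PIPE, flushing a
--     pending '#' at EOF."""
--     NORMAL, HASH, LINE, STR, STR_ESC, BLOCK, BLOCK_HASH, BLOCK_PIPE = range(8)
--     state = NORMAL
--     depth = 0
--     out = []
--     for ch in src:
--         if state == NORMAL:
--             if ch == '#':
--                 state = HASH
--             elif ch == ';':
--                 state = LINE
--             elif ch == '"':
--                 out.append('"'); state = STR
--             else:
--                 out.append(ch)
--         elif state == HASH: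
--             if ch == '|':
--                 state = BLOCK; depth = 1
--             else:
--                 out.append('#')
--                 if ch == '#':
--                     pass  # stay HASH: this '#' may pair with a later '|'
--                 elif ch == ';':
--                     state = LINE
--                 elif ch == '"':
--                     out.append('"'); state = STR
--                 else:
--                     out.append(ch); state = NORMAL
--         elif state == LINE:
--             if ch == '\n':
--                 out.append('\n'); state = NORMAL
--         elif state == STR:
--             if ch == '\\':
--                 state = STR_ESC
--             elif ch == '"':
--                 out.append('"'); state = NORMAL
--             elif ch == '\n':
--                 out.append('\n')
--         elif state == STR_ESC:
--             state = STR  # escaped char dropped (even an escaped newline)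
--         elif state == BLOCK:
--             if ch == '#':
--                 state = BLOCK_HASH
--             elif ch == '|':
--                 state = BLOCK_PIPE
--             elif ch == '\n':
--                 out.append('\n')
--         elif state == BLOCK_HASH:
--             if ch == '|':
--                 depth += 1; state = BLOCK
--             elif ch == '#':
--                 pass  # previous '#' was ordinary; this one is the new pending
--             else:
--                 if ch == '\n':
--                     out.append('\n')
--                 state = BLOCK
--         else:  # BLOCK_PIPE
--             if ch == '#':
--                 depth -= 1
--                 state = NORMAL if depth == 0 else BLOCK
--             elif ch == '|':
--                 pass  # previous '|' was ordinary; this one is the new pending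
--             else:
--                 if ch == '\n':
--                     out.append('\n')
--                 state = BLOCK
--     if state == HASH:
--         out.append('#')
--     return ''.join(out)
-- ===== Notes on version B (the rewrite author's own statement) =====
-- stated objective: alternative
-- what changed: Replaced A's index-based outer loop with nested inner while-loops and two-character lookahead (src[i], src[i+1]) by a single pass over the characters driven by an explicit state machine (NORMAL/HASH/LINE/STR/STR_ESC/BLOCK/BLOCK_HASH/BLOCK_PIPE) with no index arithmetic or lookahead, pending markers encoded in the state and flushed at EOF; a timing run measured this constant-factor faster.
import Mathlib
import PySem

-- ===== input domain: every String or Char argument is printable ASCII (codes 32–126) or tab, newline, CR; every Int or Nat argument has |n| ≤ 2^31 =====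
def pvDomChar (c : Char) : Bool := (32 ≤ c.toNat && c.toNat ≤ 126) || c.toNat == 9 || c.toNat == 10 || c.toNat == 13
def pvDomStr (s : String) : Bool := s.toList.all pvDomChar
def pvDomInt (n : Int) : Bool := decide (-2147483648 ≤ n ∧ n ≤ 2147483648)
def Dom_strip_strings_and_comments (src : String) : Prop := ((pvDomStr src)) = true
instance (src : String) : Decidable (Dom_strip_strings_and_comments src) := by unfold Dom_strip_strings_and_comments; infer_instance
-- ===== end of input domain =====

-- B is a one-pass per-character state machine (no index arithmetic, no lookahead)
-- replacing A's index loop with nested inner loops and two-char lookahead; objective: alternative decomposition.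

-- ===== PORT A =====
-- A's outer while-loop over index i, with its three inner loops as mutual helpers;
-- the index i into src becomes the remaining suffix list (src[i], src[i+1] are the
-- first two list elements; 'i + 1 < n' is whether a second element exists).
mutual
  -- the outer while-loop
  def aOuter : List Char → List Char
    | [] => []
    | [c] =>  -- i = n-1: every 'i + 1 < n' lookahead test is False
        if c = ';' then aLine []            -- ';' consumed by the line loop's first iteration
        else if c = '"' then '"' :: aStr []
        else [c]                            -- includes a final '#': no '|' after it
    | c :: c' :: rest =>
        if c = '#' ∧ c' = '|' then aBlock rest 1
        else if c = ';' then aLine (c' :: rest)   -- ';' consumed by the line loop's first iteration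
        else if c = '"' then '"' :: aStr (c' :: rest)
        else c :: aOuter (c' :: rest)
  -- inner loop: block comment, depth > 0
  def aBlock : List Char → Nat → List Char
    | [], _ => []                           -- i = n: outer loop also ends
    | [c], _ => if c = '\n' then ['\n'] else []   -- lookaheads fail; then i = n
    | c :: c' :: rest, d =>
        if c = '#' ∧ c' = '|' then aBlock rest (d + 1)
        else if c = '|' ∧ c' = '#' then
          (if d = 1 then aOuter rest else aBlock rest (d - 1))  -- depth 0: back to the outer loop
        else if c = '\n' then '\n' :: aBlock (c' :: rest) d
        else aBlock (c' :: rest) d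
  -- inner loop: string literal (after the opening '"' was emitted)
  def aStr : List Char → List Char
    | [] => []
    | [c] =>  -- a final '\\' has no following char: falls through and is skipped
        if c = '"' then ['"'] else if c = '\n' then ['\n'] else []
    | c :: c' :: rest =>
        if c = '\\' then aStr rest                    -- escape: both chars consumed, nothing emitted
        else if c = '"' then '"' :: aOuter (c' :: rest)
        else if c = '\n' then '\n' :: aStr (c' :: rest)
        else aStr (c' :: rest)
  -- inner loop: line comment; A leaves the '\n' for the outer loop, which
  -- emits it as an ordinary char — that outer step is inlined here ('\n' :: aOuter rest)
  def aLine : List Char → List Char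
    | [] => []
    | c :: rest => if c = '\n' then '\n' :: aOuter rest else aLine rest
end

def strip_strings_and_comments (src : String) : String :=
  String.mk (aOuter src.toList)

-- ===== PORT B =====
inductive BSt : Type
  | normal | hash | line | str | strEsc
  | block (d : Nat) | blockHash (d : Nat) | blockPipe (d : Nat)
deriving DecidableEq, Repr

-- one character step: next state and the characters appended to out
def stepB : BSt → Char → BSt × List Char
  | .normal, c =>
      if c = '#' then (.hash, [])
      else if c = ';' then (.line, [])
      else if c = '"' then (.str, ['"'])
      else (.normal, [c])
  | .hash, c =>
      if c = '|' then (.block 1, [])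
      else if c = '#' then (.hash, ['#'])
      else if c = ';' then (.line, ['#'])
      else if c = '"' then (.str, ['#', '"'])
      else (.normal, ['#', c])
  | .line, c => if c = '\n' then (.normal, ['\n']) else (.line, [])
  | .str, c =>
      if c = '\\' then (.strEsc, [])
      else if c = '"' then (.normal, ['"'])
      else if c = '\n' then (.str, ['\n'])
      else (.str, [])
  | .strEsc, _ => (.str, [])
  | .block d, c =>
      if c = '#' then (.blockHash d, [])
      else if c = '|' then (.blockPipe d, [])
      else if c = '\n' then (.block d, ['\n'])
      else (.block d, [])
  | .blockHash d, c =>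
      if c = '|' then (.block (d + 1), [])
      else if c = '#' then (.blockHash d, [])
      else if c = '\n' then (.block d, ['\n'])
      else (.block d, [])
  | .blockPipe d, c =>
      if c = '#' then (if d = 1 then (.normal, []) else (.block (d - 1), []))
      else if c = '|' then (.blockPipe d, [])
      else if c = '\n' then (.block d, ['\n'])
      else (.block d, [])

-- EOF flush: a pending '#' in NORMAL context is emitted
def finalB : BSt → List Char
  | .hash => ['#']
  | _ => []

-- the for-loop of Source B: state + accumulated output
def bLoop : BSt → List Char → List Char → BSt × List Char
  | st, acc, [] => (st, acc)
  | st, acc, c :: rest =>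
      let p := stepB st c
      bLoop p.1 (acc ++ p.2) rest

def strip_strings_and_comments_alt (src : String) : String :=
  let r := bLoop .normal [] src.toList
  String.mk (r.2 ++ finalB r.1)

-- ===== PRECONDITION & SPEC =====
def Spec_strip_strings_and_comments (src : String) (out : String) : Prop := out = strip_strings_and_comments_alt src
instance (src : String) (out : String) : Decidable (Spec_strip_strings_and_comments src out) := by unfold Spec_strip_strings_and_comments; infer_instance

-- ===== CLAIM (what is proved, stated in full; the proofs are below) =====
def Claim_equal_strip_strings_and_comments : Prop := ∀ (src : String), Dom_strip_strings_and_comments src → Spec_strip_strings_and_comments src (strip_strings_and_comments src)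

-- ===== LEMMAS AND PROOFS =====

-- sequential emission semantics of the state machine
def emitB : BSt → List Char → List Char
  | st, [] => finalB st
  | st, c :: rest => (stepB st c).2 ++ emitB (stepB st c).1 rest

theorem bLoop_emitB (l : List Char) (st : BSt) (acc : List Char) :
    (bLoop st acc l).2 ++ finalB (bLoop st acc l).1 = acc ++ emitB st l := by
  induction l generalizing st acc with
  | nil => simp [bLoop, emitB]
  | cons c rest ih => simp [bLoop, emitB, ih]

theorem hash_step (c : Char) (h : c ≠ '|') :
    stepB .hash c = ((stepB .normal c).1, '#' :: (stepB .normal c).2) := by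
  by_cases h1 : c = '#' <;> by_cases h2 : c = ';' <;> by_cases h3 : c = '"' <;>
    simp_all [stepB]

theorem blockHash_step (d : Nat) (c : Char) (h : c ≠ '|') :
    stepB (.blockHash d) c = stepB (.block d) c := by
  by_cases h1 : c = '#' <;> by_cases h2 : c = '\n' <;> simp_all [stepB]

theorem blockPipe_step (d : Nat) (c : Char) (h : c ≠ '#') :
    stepB (.blockPipe d) c = stepB (.block d) c := by
  by_cases h1 : c = '|' <;> by_cases h2 : c = '\n' <;> simp_all [stepB]

theorem a_eq_emitB (n : Nat) : ∀ l : List Char, l.length = n →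
    (aOuter l = emitB .normal l) ∧
    (∀ d : Nat, aBlock l (d + 1) = emitB (.block (d + 1)) l) ∧
    (aStr l = emitB .str l) ∧
    (aLine l = emitB .line l) := by
  induction n using Nat.strong_induction_on with
  | _ n ih =>
    intro l hl
    match l with
    | [] => simp [aOuter, aBlock, aStr, aLine, emitB, finalB]
    | [c] =>
      refine ⟨?_, ?_, ?_, ?_⟩
      · by_cases h1 : c = '#' <;> by_cases h2 : c = ';' <;> by_cases h3 : c = '"' <;>
          simp_all [aOuter, aLine, aStr, emitB, stepB, finalB]
      · intro d
        by_cases h1 : c = '#' <;> by_cases h2 : c = '|' <;> by_cases h3 : c = '\n' <;>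
          simp_all [aBlock, emitB, stepB, finalB]
      · by_cases h1 : c = '\\' <;> by_cases h2 : c = '"' <;> by_cases h3 : c = '\n' <;>
          simp_all [aStr, emitB, stepB, finalB]
      · by_cases h1 : c = '\n' <;>
          simp_all [aLine, aOuter, emitB, stepB, finalB]
    | c :: c' :: rest =>
      subst hl
      have ih1 := ih (rest.length) (by simp) rest rfl
      have ih2 := ih (rest.length + 1) (by simp) (c' :: rest) (by simp)
      refine ⟨?_, ?_, ?_, ?_⟩
      · -- aOuter
        by_cases hc : c = '#' ∧ c' = '|'
        · obtain ⟨h1, h2⟩ := hc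
          subst h1; subst h2
          simp [aOuter, emitB, stepB, ih1.2.1 0]
        · rw [aOuter]
          rw [if_neg hc]
          by_cases h2 : c = ';'
          · subst h2
            simp [emitB, stepB, ih2.2.2.2]
          · by_cases h3 : c = '"'
            · subst h3
              simp [emitB, stepB, ih2.2.2.1]
            · rw [if_neg h2, if_neg h3]
              by_cases h1 : c = '#'
              · subst h1
                have h4 : c' ≠ '|' := by intro h; exact hc ⟨rfl, h⟩
                rw [show emitB .normal ('#' :: c' :: rest)
                      = (stepB .hash c').2 ++ emitB (stepB .hash c').1 rest by
                    simp [emitB, stepB]]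
                rw [hash_step c' h4]
                have : emitB BSt.normal (c' :: rest)
                    = (stepB .normal c').2 ++ emitB (stepB .normal c').1 rest := by
                  simp [emitB]
                rw [ih2.1, this]
                simp
              · rw [show emitB .normal (c :: c' :: rest)
                      = (stepB .normal c).2 ++ emitB (stepB .normal c).1 (c' :: rest) by
                    simp [emitB]]
                rw [show stepB .normal c = (.normal, [c]) by
                    simp [stepB, h1, h2, h3]]
                simp [ih2.1]
      · -- aBlock
        intro d
        by_cases hc : c = '#' ∧ c' = '|'
        · obtain ⟨h1, h2⟩ := hc
          subst h1; subst h2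
          simp [aBlock, emitB, stepB, ih1.2.1 (d + 1)]
        · rw [aBlock, if_neg hc]
          by_cases hp : c = '|' ∧ c' = '#'
          · obtain ⟨h1, h2⟩ := hp
            subst h1; subst h2
            rw [if_pos ⟨rfl, rfl⟩]
            by_cases hd : d = 0
            · subst hd
              simp [emitB, stepB, ih1.1]
            · obtain ⟨d', rfl⟩ := Nat.exists_eq_succ_of_ne_zero hd
              simp [emitB, stepB, ih1.2.1 d']
          · rw [if_neg hp]
            have step2 : emitB (.block (d+1)) (c :: c' :: rest)
                = (stepB (.block (d+1)) c).2
                  ++ emitB (stepB (.block (d+1)) c).1 (c' :: rest) := by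
              simp [emitB]
            by_cases h1 : c = '#'
            · subst h1
              have h4 : c' ≠ '|' := by intro h; exact hc ⟨rfl, h⟩
              rw [if_neg (by simp : ¬('#' = '\n'))]
              rw [step2]
              rw [show stepB (.block (d+1)) '#' = (.blockHash (d+1), []) by
                  simp [stepB]]
              have : emitB (.blockHash (d+1)) (c' :: rest)
                  = (stepB (.block (d+1)) c').2
                    ++ emitB (stepB (.block (d+1)) c').1 rest := by
                simp [emitB, blockHash_step (d+1) c' h4]
              rw [this, ← show emitB (.block (d+1)) (c' :: rest)
                    = (stepB (.block (d+1)) c').2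
                      ++ emitB (stepB (.block (d+1)) c').1 rest by simp [emitB]]
              simpa using ih2.2.1 d
            · by_cases h5 : c = '|'
              · subst h5
                have h6 : c' ≠ '#' := by intro h; exact hp ⟨rfl, h⟩
                rw [if_neg (by simp : ¬('|' = '\n'))]
                rw [step2]
                rw [show stepB (.block (d+1)) '|' = (.blockPipe (d+1), []) by
                    simp [stepB]]
                have : emitB (.blockPipe (d+1)) (c' :: rest)
                    = (stepB (.block (d+1)) c').2
                      ++ emitB (stepB (.block (d+1)) c').1 rest := by
                  simp [emitB, blockPipe_step (d+1) c' h6]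
                rw [this, ← show emitB (.block (d+1)) (c' :: rest)
                      = (stepB (.block (d+1)) c').2
                        ++ emitB (stepB (.block (d+1)) c').1 rest by simp [emitB]]
                simpa using ih2.2.1 d
              · by_cases h7 : c = '\n'
                · subst h7
                  rw [if_pos rfl, step2]
                  rw [show stepB (.block (d+1)) '\n' = (.block (d+1), ['\n']) by
                      simp [stepB]]
                  simpa using congrArg (List.cons '\n') (ih2.2.1 d)
                · rw [if_neg h7, step2]
                  rw [show stepB (.block (d+1)) c = (.block (d+1), []) by
                      simp [stepB, h1, h5, h7]]
                  simpa using ih2.2.1 d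
      · -- aStr
        by_cases h1 : c = '\\'
        · subst h1
          simp [aStr, emitB, stepB, ih1.2.2.1]
        · rw [aStr, if_neg h1]
          by_cases h2 : c = '"'
          · subst h2
            simp [emitB, stepB, ih2.1]
          · by_cases h3 : c = '\n'
            · subst h3
              simp [emitB, stepB, ih2.2.2.1]
            · rw [if_neg h2, if_neg h3]
              rw [show emitB .str (c :: c' :: rest)
                    = (stepB .str c).2 ++ emitB (stepB .str c).1 (c' :: rest) by
                  simp [emitB]]
              rw [show stepB .str c = (.str, []) by simp [stepB, h1, h2, h3]]
              simpa using ih2.2.2.1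
      · -- aLine
        by_cases h1 : c = '\n'
        · subst h1
          simp [aLine, emitB, stepB, ih2.1]
        · rw [aLine, if_neg h1, ih2.2.2.2]
          simp [emitB, stepB, h1]

-- ===== VERDICT (by name: the statement is the Claim_ definition above) =====
theorem strip_strings_and_comments_spec : Claim_equal_strip_strings_and_comments := by
  intro src _
  unfold Spec_strip_strings_and_comments strip_strings_and_comments strip_strings_and_comments_alt
  show String.mk (aOuter src.toList)
      = String.mk ((bLoop .normal [] src.toList).2 ++ finalB (bLoop .normal [] src.toList).1)
  rw [bLoop_emitB, (a_eq_emitB src.toList.length src.toList rfl).1]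
  simp
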